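-- pv_equiv track=rewrite | github.com/liuwei464976266/mygit | Old/basketballStarJAVA - (2).py | getColsSymbol
-- ===== SOURCE A (Python) =====
-- SCATTER = '10'
--
-- def getColsSymbol(points):#取出各列中奖位置
--     symbol13_list = []
--     col1, col2, col3, col4, col5 = {}, {}, {}, {}, {}
--     for i in range(len(points)):
--         if points[i] == int(SCATTER):
--             symbol13_list.append(i)
--         elif i % 5 == 0:
--             col1[i] = points[i]
--         elif i % 5 == 1:
--             col2[i] = points[i]
--         elif i % 5 == 2:
--             col3[i] = points[i]
--         elif i % 5 == 3:
--             col4[i] = points[i]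
--         elif i % 5 == 4:
--             col5[i] = points[i]
--     return col1,col2,col3,col4,col5,symbol13_list
-- ===== SOURCE B (Python) =====
-- SCATTER = '10'
--
-- def getColsSymbol(points):
--     n = len(points)
--     s = int(SCATTER)
--     symbol13_list = [i for i in range(n) if points[i] == s]
--     col1, col2, col3, col4, col5 = (
--         {i: points[i] for i in range(n) if i % 5 == j and points[i] != s}
--         for j in range(5))
--     return col1, col2, col3, col4, col5, symbol13_list
-- ===== Notes on version B (the rewrite author's own statement) =====
-- stated objective: simpler
-- what changed: Replaces A's single pass with a 6-way if/elif dispatch over mutable dicts by six independent comprehension passes: one filter pass collecting scatter indices and, for each column j in 0..4, a separate pass keeping indices with i % 5 == j and a non-scatter value.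
import Mathlib
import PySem

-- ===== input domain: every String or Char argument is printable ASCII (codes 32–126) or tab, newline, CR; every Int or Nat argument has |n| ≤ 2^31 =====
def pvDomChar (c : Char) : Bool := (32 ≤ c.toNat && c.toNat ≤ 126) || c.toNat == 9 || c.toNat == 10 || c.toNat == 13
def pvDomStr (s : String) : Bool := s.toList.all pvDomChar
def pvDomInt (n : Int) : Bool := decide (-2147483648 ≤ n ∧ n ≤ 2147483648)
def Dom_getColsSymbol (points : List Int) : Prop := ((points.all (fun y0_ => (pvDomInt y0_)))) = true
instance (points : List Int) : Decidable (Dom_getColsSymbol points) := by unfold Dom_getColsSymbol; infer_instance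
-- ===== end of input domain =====

-- B replaces A's single-pass 6-way if/elif dispatch by six independent comprehension passes (simpler decomposition, same O(n) cost).

-- ===== PORT A =====
-- One loop step of A's for-loop; the dicts are association lists: every key i occurs
-- at most once (each loop index is fresh), so Python's dict insertion is exactly append.
def pvStepA (points : List Int) (st : (List (Int × Int)) × (List (Int × Int)) × (List (Int × Int)) × (List (Int × Int)) × (List (Int × Int)) × List Int) (i : Nat) : (List (Int × Int)) × (List (Int × Int)) × (List (Int × Int)) × (List (Int × Int)) × (List (Int × Int)) × List Int :=
  match st with
  | (c1, c2, c3, c4, c5, sc) =>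
    let p := points.getD i 0   -- points[i], i ∈ range(len(points)) so in range
    if p = 10 then (c1, c2, c3, c4, c5, sc ++ [(i : Int)])
    else if i % 5 = 0 then (c1 ++ [((i : Int), p)], c2, c3, c4, c5, sc)
    else if i % 5 = 1 then (c1, c2 ++ [((i : Int), p)], c3, c4, c5, sc)
    else if i % 5 = 2 then (c1, c2, c3 ++ [((i : Int), p)], c4, c5, sc)
    else if i % 5 = 3 then (c1, c2, c3, c4 ++ [((i : Int), p)], c5, sc)
    else if i % 5 = 4 then (c1, c2, c3, c4, c5 ++ [((i : Int), p)], sc)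
    else (c1, c2, c3, c4, c5, sc)

def getColsSymbol (points : List Int) : (List (Int × Int)) × (List (Int × Int)) × (List (Int × Int)) × (List (Int × Int)) × (List (Int × Int)) × List Int :=
  (List.range points.length).foldl (pvStepA points) ([], [], [], [], [], [])

-- ===== PORT B =====
-- column j of B: the dict comprehension {i: points[i] for i in range(n) if i % 5 == j and points[i] != 10}
def pvColB (points : List Int) (n j : Nat) : List (Int × Int) :=
  ((List.range n).filter (fun i => i % 5 == j && !(points.getD i 0 == 10))).map
    (fun (i : Nat) => ((i : Int), points.getD i 0))

-- the scatter list comprehension [i for i in range(n) if points[i] == 10]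
def pvScatB (points : List Int) (n : Nat) : List Int :=
  ((List.range n).filter (fun i => points.getD i 0 == 10)).map (fun i => (i : Int))

def getColsSymbol_alt (points : List Int) : (List (Int × Int)) × (List (Int × Int)) × (List (Int × Int)) × (List (Int × Int)) × (List (Int × Int)) × List Int :=
  (pvColB points points.length 0, pvColB points points.length 1, pvColB points points.length 2,
   pvColB points points.length 3, pvColB points points.length 4, pvScatB points points.length)

-- ===== PRECONDITION & SPEC =====
def Spec_getColsSymbol (points : List Int) (out : (List (Int × Int)) × (List (Int × Int)) × (List (Int × Int)) × (List (Int × Int)) × (List (Int × Int)) × List Int) : Prop := out = getColsSymbol_alt points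
instance (points : List Int) (out : (List (Int × Int)) × (List (Int × Int)) × (List (Int × Int)) × (List (Int × Int)) × (List (Int × Int)) × List Int) : Decidable (Spec_getColsSymbol points out) := by
  unfold Spec_getColsSymbol
  -- the 6-component product is one level past the default instance-search size; compose the product instance explicitly
  have h3 : DecidableEq ((List (Int × Int)) × (List (Int × Int)) × List Int) := inferInstance
  have h4 : DecidableEq ((List (Int × Int)) × (List (Int × Int)) × (List (Int × Int)) × List Int) := @instDecidableEqProd _ _ _ h3
  have h5 : DecidableEq ((List (Int × Int)) × (List (Int × Int)) × (List (Int × Int)) × (List (Int × Int)) × List Int) := @instDecidableEqProd _ _ _ h4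
  have h6 : DecidableEq ((List (Int × Int)) × (List (Int × Int)) × (List (Int × Int)) × (List (Int × Int)) × (List (Int × Int)) × List Int) := @instDecidableEqProd _ _ _ h5
  exact h6 _ _

-- ===== CLAIM (what is proved, stated in full; the proofs are below) =====
def Claim_equal_getColsSymbol : Prop := ∀ (points : List Int), Dom_getColsSymbol points → Spec_getColsSymbol points (getColsSymbol points)

-- ===== LEMMAS AND PROOFS =====

lemma pvColB_succ (points : List Int) (n j : Nat) :
    pvColB points (n + 1) j =
      pvColB points n j ++
        (if n % 5 == j && !(points.getD n 0 == 10) then [((n : Int), points.getD n 0)] else []) := by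
  by_cases h1 : n % 5 = j <;> by_cases h2 : points[n]?.getD 0 = 10 <;>
    simp [pvColB, List.range_succ, List.filter_append, List.getD, h1, h2]

lemma pvScatB_succ (points : List Int) (n : Nat) :
    pvScatB points (n + 1) =
      pvScatB points n ++ (if points.getD n 0 == 10 then [(n : Int)] else []) := by
  by_cases h : points[n]?.getD 0 = 10 <;>
    simp [pvScatB, List.range_succ, List.filter_append, List.getD, h]

lemma pvFold_eq (points : List Int) (n : Nat) :
    (List.range n).foldl (pvStepA points) ([], [], [], [], [], []) =
      (pvColB points n 0, pvColB points n 1, pvColB points n 2, pvColB points n 3,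
       pvColB points n 4, pvScatB points n) := by
  induction n with
  | zero => simp [pvColB, pvScatB]
  | succ n ih =>
    rw [List.range_succ, List.foldl_append, ih]
    simp only [List.foldl_cons, List.foldl_nil, pvStepA]
    rw [pvColB_succ, pvColB_succ, pvColB_succ, pvColB_succ, pvColB_succ, pvScatB_succ]
    by_cases hp : points[n]?.getD 0 = 10
    · simp [List.getD, hp]
    · have h5 : n % 5 < 5 := Nat.mod_lt _ (by norm_num)
      interval_cases h : n % 5 <;> simp [List.getD, hp, h]

-- ===== VERDICT (by name: the statement is the Claim_ definition above) =====
theorem getColsSymbol_spec : Claim_equal_getColsSymbol := by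
  intro points _
  show getColsSymbol points = getColsSymbol_alt points
  rw [getColsSymbol, getColsSymbol_alt, pvFold_eq]
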